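-- pv_equiv track=rewrite | github.com/abishek12345-coder/PCC-VizForge | src/utils/theming.py | get_color_palette
-- ===== SOURCE A (Python) =====
-- from typing import Dict, List, Optional, Union
--
-- COLOR_PALETTES = {
--     "default": ["#1f77b4", "#ff7f0e", "#2ca02c", "#d62728", "#9467bd"],
--     "vibrant": ["#e74c3c", "#3498db", "#2ecc71", "#f39c12", "#9b59b6"],
--     "pastel": ["#ffb3ba", "#baffc9", "#bae1ff", "#ffffba", "#ffdfba"],
--     "dark": ["#2c3e50", "#34495e", "#7f8c8d", "#95a5a6", "#bdc3c7"],
--     "scientific": ["#003f5c", "#2f4b7c", "#665191", "#a05195", "#d45087"],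
--     "earth": ["#8B4513", "#228B22", "#4682B4", "#DAA520", "#CD853F"],
--     "github": ["#24292e", "#0366d6", "#28a745", "#ffd33d", "#d73a49"],
-- }
--
-- def get_color_palette(name: str = "default", n_colors: Optional[int] = None) -> List[str]:
--     """Get a color palette by name.
--
--     Args:
--         name: Name of the color palette
--         n_colors: Number of colors to return (cycles if more than available)
--
--     Returns:
--         List of color hex codes
--     """
--     if name not in COLOR_PALETTES:
--         name = "default"
--
--     palette = COLOR_PALETTES[name]
--
--     if n_colors is None:
--         return palette
--
--     # Cycle colors if more needed than available
--     extended_palette = []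
--     for i in range(n_colors):
--         extended_palette.append(palette[i % len(palette)])
--
--     return extended_palette
-- ===== SOURCE B (Python) =====
-- COLOR_PALETTES = {
--     "default": ["#1f77b4", "#ff7f0e", "#2ca02c", "#d62728", "#9467bd"],
--     "vibrant": ["#e74c3c", "#3498db", "#2ecc71", "#f39c12", "#9b59b6"],
--     "pastel": ["#ffb3ba", "#baffc9", "#bae1ff", "#ffffba", "#ffdfba"],
--     "dark": ["#2c3e50", "#34495e", "#7f8c8d", "#95a5a6", "#bdc3c7"],
--     "scientific": ["#003f5c", "#2f4b7c", "#665191", "#a05195", "#d45087"],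
--     "earth": ["#8B4513", "#228B22", "#4682B4", "#DAA520", "#CD853F"],
--     "github": ["#24292e", "#0366d6", "#28a745", "#ffd33d", "#d73a49"],
-- }
--
-- def get_color_palette(name: str = "default", n_colors=None):
--     palette = COLOR_PALETTES.get(name, COLOR_PALETTES["default"])
--     if n_colors is None:
--         return palette
--     n = max(0, n_colors)
--     reps, rem = divmod(n, len(palette))
--     return palette * reps + palette[:rem]
-- ===== Notes on version B (the rewrite author's own statement) =====
-- stated objective: simpler
-- what changed: Replaces the per-element index-modulo append loop with a bulk replicate-and-truncate: divmod(n, len(palette)) gives full repeats via list multiplication plus a sliced partial tail, and the missing-name fallback becomes dict.get with a default.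
import Mathlib
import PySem

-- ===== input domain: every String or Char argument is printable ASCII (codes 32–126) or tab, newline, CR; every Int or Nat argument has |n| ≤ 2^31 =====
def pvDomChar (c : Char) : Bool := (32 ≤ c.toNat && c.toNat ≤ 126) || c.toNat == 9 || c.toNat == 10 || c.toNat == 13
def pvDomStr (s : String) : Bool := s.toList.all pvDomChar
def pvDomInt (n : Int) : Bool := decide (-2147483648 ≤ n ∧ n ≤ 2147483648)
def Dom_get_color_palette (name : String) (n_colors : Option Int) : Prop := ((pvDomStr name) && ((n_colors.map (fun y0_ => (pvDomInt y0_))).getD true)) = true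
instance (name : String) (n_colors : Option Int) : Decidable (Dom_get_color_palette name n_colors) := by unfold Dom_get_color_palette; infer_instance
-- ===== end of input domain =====

-- B replaces A's per-element index-modulo append loop with divmod replicate-and-truncate
-- (full repeats by list multiplication plus a sliced partial tail); objective: simpler.

-- module-level constant COLOR_PALETTES (shared by both sources)
def COLOR_PALETTES : PySem.Dict String (List String) := PySem.Dict.ofList [
  ("default", ["#1f77b4", "#ff7f0e", "#2ca02c", "#d62728", "#9467bd"]),
  ("vibrant", ["#e74c3c", "#3498db", "#2ecc71", "#f39c12", "#9b59b6"]),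
  ("pastel", ["#ffb3ba", "#baffc9", "#bae1ff", "#ffffba", "#ffdfba"]),
  ("dark", ["#2c3e50", "#34495e", "#7f8c8d", "#95a5a6", "#bdc3c7"]),
  ("scientific", ["#003f5c", "#2f4b7c", "#665191", "#a05195", "#d45087"]),
  ("earth", ["#8B4513", "#228B22", "#4682B4", "#DAA520", "#CD853F"]),
  ("github", ["#24292e", "#0366d6", "#28a745", "#ffd33d", "#d73a49"])]

-- ===== PORT A =====
def get_color_palette (name : String) (n_colors : Option Int) : List String :=
  -- if name not in COLOR_PALETTES: name = "default"
  let name := if COLOR_PALETTES.contains name then name else "default"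
  -- COLOR_PALETTES[name]: the key is always present here, so the KeyError default is never used
  let palette := (COLOR_PALETTES.get? name).getD []
  match n_colors with
  | none => palette
  | some n =>
      -- for i in range(n_colors): extended_palette.append(palette[i % len(palette)])
      -- the index i % len(palette) is always in range (len = 5), so the IndexError default is never used
      (PySem.List.pyRange 0 n 1).foldl
        (fun acc i => acc ++ [PySem.List.pyGetD palette (PySem.Int.mod i (palette.length : Int)) ""]) []

-- ===== PORT B =====
def get_color_palette_alt (name : String) (n_colors : Option Int) : List String :=
  -- COLOR_PALETTES.get(name, COLOR_PALETTES["default"])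
  let palette := (COLOR_PALETTES.get? name).getD ((COLOR_PALETTES.get? "default").getD [])
  match n_colors with
  | none => palette
  | some n =>
      let m := max 0 n
      -- reps, rem = divmod(n, len(palette))
      let reps := PySem.Int.floordiv m (palette.length : Int)
      let rem := PySem.Int.mod m (palette.length : Int)
      -- palette * reps + palette[:rem]
      (List.replicate reps.toNat palette).flatten ++ PySem.List.slice palette none (some rem)

-- ===== PRECONDITION & SPEC =====
def Spec_get_color_palette (name : String) (n_colors : Option Int) (out : List String) : Prop := out = get_color_palette_alt name n_colors
instance (name : String) (n_colors : Option Int) (out : List String) : Decidable (Spec_get_color_palette name n_colors out) := by unfold Spec_get_color_palette; infer_instance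

-- ===== CLAIM (what is proved, stated in full; the proofs are below) =====
def Claim_equal_get_color_palette : Prop := ∀ (name : String) (n_colors : Option Int), Dom_get_color_palette name n_colors → Spec_get_color_palette name n_colors (get_color_palette name n_colors)

-- ===== LEMMAS AND PROOFS =====

-- COLOR_PALETTES as a literal association list
lemma CP_mk : COLOR_PALETTES = PySem.Dict.mk [
    ("default", ["#1f77b4", "#ff7f0e", "#2ca02c", "#d62728", "#9467bd"]),
    ("vibrant", ["#e74c3c", "#3498db", "#2ecc71", "#f39c12", "#9b59b6"]),
    ("pastel", ["#ffb3ba", "#baffc9", "#bae1ff", "#ffffba", "#ffdfba"]),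
    ("dark", ["#2c3e50", "#34495e", "#7f8c8d", "#95a5a6", "#bdc3c7"]),
    ("scientific", ["#003f5c", "#2f4b7c", "#665191", "#a05195", "#d45087"]),
    ("earth", ["#8B4513", "#228B22", "#4682B4", "#DAA520", "#CD853F"]),
    ("github", ["#24292e", "#0366d6", "#28a745", "#ffd33d", "#d73a49"])] := by rfl

-- every palette stored in the table has exactly 5 colors
lemma palette_length (name : String) (p : List String) (h : COLOR_PALETTES.get? name = some p) :
    p.length = 5 := by
  rw [CP_mk] at h
  simp only [PySem.Dict.get?_mk_cons] at h
  split_ifs at h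
  all_goals first | (cases h; rfl) | (simp [PySem.Dict.get?] at h)

-- the cycling loop, in Nat form: mapping k ↦ p[k % 5] over range m is ⌊m/5⌋ copies of p plus a take of the remainder
lemma cyc (p : List String) (hp : p.length = 5) (m : Nat) :
    (List.range m).map (fun k => p.getD (k % 5) "") =
      (List.replicate (m / 5) p).flatten ++ p.take (m % 5) := by
  obtain ⟨a, b, c, d, e, rfl⟩ : ∃ a b c d e, p = [a, b, c, d, e] := by
    rcases p with _ | ⟨a, _ | ⟨b, _ | ⟨c, _ | ⟨d, _ | ⟨e, _ | ⟨f, t⟩⟩⟩⟩⟩⟩ <;>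
      simp at hp
    exact ⟨a, b, c, d, e, rfl⟩
  induction m with
  | zero => simp
  | succ m ih =>
    rw [List.range_succ, List.map_append, ih]
    have : m % 5 = 0 ∨ m % 5 = 1 ∨ m % 5 = 2 ∨ m % 5 = 3 ∨ m % 5 = 4 := by omega
    rcases this with h | h | h | h | h <;>
      · first
          | (have h1 : (m + 1) / 5 = m / 5 := by omega
             have h2 : (m + 1) % 5 = m % 5 + 1 := by omega
             rw [h1, h2, h]
             simp [List.getD, h])
          | (have h1 : (m + 1) / 5 = m / 5 + 1 := by omega
             have h2 : (m + 1) % 5 = 0 := by omega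
             rw [h1, h2, h, List.replicate_succ', List.flatten_append]
             simp [List.getD, h])

-- the Int-level cycling equality between A's loop and B's replicate-and-truncate
lemma cyc_int (p : List String) (hp : p.length = 5) (n : Int) :
    (PySem.List.pyRange 0 n 1).foldl
        (fun acc i => acc ++ [PySem.List.pyGetD p (PySem.Int.mod i (p.length : Int)) ""]) [] =
      (List.replicate (PySem.Int.floordiv (max 0 n) (p.length : Int)).toNat p).flatten ++
        PySem.List.slice p none (some (PySem.Int.mod (max 0 n) (p.length : Int))) := by
  have hmax : max (0 : Int) n = ((n.toNat : Nat) : Int) := by rw [Int.toNat_eq_max, max_comm]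
  have hlen : (p.length : Int) = ((5 : Nat) : Int) := by rw [hp]
  rw [hmax, hlen, PySem.Int.floordiv_natCast, PySem.Int.mod_natCast,
    PySem.List.slice_to _ (by positivity), PySem.List.foldl_append_singleton_eq_map,
    PySem.List.pyRange_one]
  simp only [Int.sub_zero, Int.toNat_natCast, List.map_map, List.nil_append]
  have hfun : ((fun i : Int => PySem.List.pyGetD p (PySem.Int.mod i ((5 : Nat) : Int)) "") ∘
      (fun k : Nat => (0 : Int) + (k : Int))) = fun k : Nat => p.getD (k % 5) "" := by
    funext k
    simp only [Function.comp_apply, zero_add, PySem.Int.mod_natCast k 5,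
      PySem.List.pyGetD_natCast]
  rw [hfun]
  exact cyc p hp n.toNat

-- ===== VERDICT (by name: the statement is the Claim_ definition above) =====
theorem get_color_palette_spec : Claim_equal_get_color_palette := by
  intro name n_colors _
  unfold Spec_get_color_palette
  have hd : COLOR_PALETTES.get? "default" =
      some ["#1f77b4", "#ff7f0e", "#2ca02c", "#d62728", "#9467bd"] := by rfl
  cases h : COLOR_PALETTES.get? name with
  | some p =>
    have hc : COLOR_PALETTES.contains name = true := by
      rw [PySem.Dict.contains_eq_isSome_get?, h]; rfl
    cases n_colors with
    | none => simp [get_color_palette, get_color_palette_alt, hc, h]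
    | some n =>
      simp only [get_color_palette, get_color_palette_alt, hc, if_true, h, Option.getD_some]
      exact cyc_int p (palette_length name p h) n
  | none =>
    have hc : COLOR_PALETTES.contains name = false := by
      rw [PySem.Dict.contains_eq_isSome_get?, h]; rfl
    cases n_colors with
    | none => simp [get_color_palette, get_color_palette_alt, hc, h, hd]
    | some n =>
      simp only [get_color_palette, get_color_palette_alt, hc, Bool.false_eq_true, if_false,
        h, hd, Option.getD_some, Option.getD_none]
      exact cyc_int _ (palette_length "default" _ hd) n
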